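-- pv_equiv track=rewrite | github.com/kikkass/Kikkass-Python | CodingChallenge/Set5Problem2.py | retain_largest
-- ===== SOURCE A (Python) =====
-- def retain_largest(allies):
--     '''
--     This is custome algorithm to to retain only those allies in the list of allies which has highest number of members
--     '''
--     i = 0
--     while i < len(allies) - 1:
--         if len(allies[i]) < len(allies[i+1]):
--             del allies[0:i+1]
--             i = 0
--         elif len(allies[i]) > len(allies[i+1]):
--             allies.remove(allies[i+1])
--         else:
--             i += 1
--     return allies
-- ===== SOURCE B (Python) =====
-- def retain_largest(allies):
--     '''Single streaming pass keeping all sublists of maximal length; mutates allies in place like A.'''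
--     best_len = -1
--     best = []
--     for a in allies:
--         n = len(a)
--         if n > best_len:
--             best_len = n
--             best = [a]
--         elif n == best_len:
--             best.append(a)
--     allies[:] = best
--     return allies
-- ===== Notes on version B (the rewrite author's own statement) =====
-- stated objective: simpler
-- what changed: A's while-loop repeatedly deletes prefixes (del allies[0:i+1]) and removes shorter elements one list.remove at a time, restarting the scan; B does one streaming pass keeping a best-so-far length and the list of sublists attaining it, then writes it back in place.
import Mathlib
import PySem

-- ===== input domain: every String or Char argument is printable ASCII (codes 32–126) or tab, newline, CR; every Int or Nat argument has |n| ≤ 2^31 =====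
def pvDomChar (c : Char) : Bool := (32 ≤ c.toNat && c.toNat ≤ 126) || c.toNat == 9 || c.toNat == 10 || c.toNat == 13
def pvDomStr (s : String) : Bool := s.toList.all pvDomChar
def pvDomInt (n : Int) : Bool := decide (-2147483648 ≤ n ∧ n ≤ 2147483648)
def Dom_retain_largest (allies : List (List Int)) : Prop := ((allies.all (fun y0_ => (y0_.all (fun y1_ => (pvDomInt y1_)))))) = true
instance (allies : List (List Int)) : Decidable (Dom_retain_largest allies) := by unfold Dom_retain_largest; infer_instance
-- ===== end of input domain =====

-- B replaces A's in-place delete/remove while-loop with one streaming pass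
-- keeping the best-so-far; equivalence is about the RETURN value (both
-- Pythons mutate `allies` in place to the same final contents).

-- ===== PORT A =====
-- A's while loop: state is the current list and the index i.  The fuel argument
-- only makes the recursion structural: the loop's measure l.length - i strictly
-- decreases, so fuel = allies.length (supplied below) is never exhausted.
def retainLoop : Nat → List (List Int) → Nat → List (List Int)
  | 0, l, _ => l
  | Nat.succ fuel, l, i =>
    if h : i + 1 < l.length then
      if (l[i]'(by omega)).length < (l[i+1]'h).length then
        retainLoop fuel (l.drop (i+1)) 0                  -- del allies[0:i+1]; i = 0
      else if (l[i]'(by omega)).length > (l[i+1]'h).length then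
        match PySem.List.remove? l (l[i+1]'h) with        -- allies.remove(allies[i+1])
        | some l' => retainLoop fuel l' i
        | none => l  -- unreachable: the element is present, Python only raises when it is not
      else retainLoop fuel l (i+1)                        -- i += 1
    else l

def retain_largest (allies : List (List Int)) : List (List Int) :=
  retainLoop allies.length allies 0

-- ===== PORT B =====
def retain_largest_alt (allies : List (List Int)) : List (List Int) :=
  (allies.foldl (fun s a =>
      let n : Int := a.length
      if n > s.1 then (n, [a])
      else if n = s.1 then (s.1, s.2 ++ [a])
      else s) ((-1 : Int), ([] : List (List Int)))).2

-- ===== PRECONDITION & SPEC =====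
def Spec_retain_largest (allies : List (List Int)) (out : List (List Int)) : Prop := out = retain_largest_alt allies
instance (allies : List (List Int)) (out : List (List Int)) : Decidable (Spec_retain_largest allies out) := by unfold Spec_retain_largest; infer_instance

-- ===== CLAIM (what is proved, stated in full; the proofs are below) =====
def Claim_equal_retain_largest : Prop := ∀ (allies : List (List Int)), Dom_retain_largest allies → Spec_retain_largest allies (retain_largest allies)

-- ===== LEMMAS AND PROOFS =====

-- maximum of the member counts (as Int, -1 for the empty list)
def pvM (l : List (List Int)) : Int := l.foldl (fun m a => max m (a.length : Int)) (-1)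

-- the common normal form: the sublists of maximal length, in order
def pvKeep (l : List (List Int)) : List (List Int) :=
  l.filter (fun a => ((a.length : Int) == pvM l))

theorem pvM_foldl_init (l : List (List Int)) (i : Int) (hi : -1 ≤ i) :
    l.foldl (fun m a => max m (a.length : Int)) i = max i (pvM l) := by
  induction l generalizing i with
  | nil => simp [pvM]; omega
  | cons a t ih =>
    have ha : (0:Int) ≤ (a.length : Int) := Int.natCast_nonneg _
    simp only [pvM, List.foldl_cons] at *
    rw [ih (max i (a.length:Int)) (by omega), ih (max (-1) (a.length:Int)) (by omega)]
    omega

theorem pvM_append (p q : List (List Int)) : pvM (p ++ q) = max (pvM p) (pvM q) := by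
  have hp : -1 ≤ pvM p := by
    induction p with
    | nil => simp [pvM]
    | cons a t ih =>
      simp only [pvM] at *
      rw [List.foldl_cons, pvM_foldl_init t _ (by have := Int.natCast_nonneg a.length; omega)]
      omega
  simp only [pvM, List.foldl_append]
  rw [← pvM, ← pvM, pvM_foldl_init _ _ hp]

theorem pvM_cons (a : List Int) (t : List (List Int)) :
    pvM (a :: t) = max (a.length : Int) (pvM t) := by
  have := pvM_append [a] t
  simp only [List.singleton_append] at this
  rw [this]
  have ha : (0:Int) ≤ (a.length : Int) := Int.natCast_nonneg _
  have : pvM [a] = (a.length : Int) := by simp [pvM]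
  omega

theorem le_pvM (x : List Int) (l : List (List Int)) : x ∈ l → (x.length : Int) ≤ pvM l := by
  induction l with
  | nil => intro h; cases h
  | cons a t ih =>
    intro h
    rw [pvM_cons]
    rcases List.mem_cons.mp h with h | h
    · subst h; omega
    · have := ih h; omega

theorem pvM_le (l : List (List Int)) (c : Int) (hc : -1 ≤ c) :
    (∀ x ∈ l, (x.length : Int) ≤ c) → pvM l ≤ c := by
  induction l with
  | nil => intro; simpa [pvM]
  | cons a t ih =>
    intro h
    rw [pvM_cons]
    have h1 := h a (by simp)
    have h2 := ih (fun x hx => h x (by simp [hx]))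
    omega

-- loop invariant of A: all elements of the scanned prefix have equal member counts
def pvInv (l : List (List Int)) (i : Nat) : Prop :=
  ∀ x ∈ l.take (i+1), ∀ y ∈ l.take (i+1), x.length = y.length

theorem pvInv_zero (l : List (List Int)) : pvInv l 0 := by
  intro x hx y hy
  rcases l with _ | ⟨a, t⟩
  · cases hx
  · simp only [List.take_succ, List.take_zero, List.nil_append] at hx hy
    simp at hx hy
    rw [hx, hy]

theorem pvKeep_all_eq (l : List (List Int)) (hne : l ≠ [])
    (h : ∀ x ∈ l, ∀ y ∈ l, x.length = y.length) : pvKeep l = l := by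
  rcases l with _ | ⟨a, t⟩
  · exact absurd rfl hne
  · have hM : pvM (a :: t) = (a.length : Int) := by
      have h1 : pvM (a :: t) ≤ (a.length : Int) := by
        apply pvM_le _ _ (by have := Int.natCast_nonneg a.length; omega)
        intro x hx
        have := h x hx a (by simp)
        omega
      have h2 := le_pvM a (a :: t) (by simp)
      omega
    unfold pvKeep
    rw [hM, List.filter_eq_self]
    intro x hx
    have := h x hx a (by simp)
    simp [this]

-- terminal state of the loop: the scanned prefix is the whole list
theorem pvTerminal (l : List (List Int)) (i : Nat) (hge : l.length ≤ i + 1)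
    (hinv : pvInv l i) : l = pvKeep l := by
  rcases eq_or_ne l [] with hl | hl
  · subst hl; rfl
  · have htake : l.take (i+1) = l := List.take_of_length_le hge
    unfold pvInv at hinv
    rw [htake] at hinv
    exact (pvKeep_all_eq l hl hinv).symm

-- the key characterisation of A's while-loop
theorem retainLoop_eq : ∀ (fuel : Nat) (l : List (List Int)) (i : Nat),
    l.length ≤ fuel + i → pvInv l i → retainLoop fuel l i = pvKeep l := by
  intro fuel
  induction fuel with
  | zero =>
    intro l i hfuel hinv
    exact pvTerminal l i (by omega) hinv
  | succ fuel ih =>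
    intro l i hfuel hinv
    rw [retainLoop]
    by_cases h : i + 1 < l.length
    · rw [dif_pos h]
      by_cases hlt : (l[i]'(by omega)).length < (l[i+1]'h).length
      · rw [if_pos hlt]
        rw [ih _ 0 (by have := List.length_drop (l := l) (i := i + 1); omega) (pvInv_zero _)]
        have hmemi : l[i] ∈ l.take (i+1) :=
          List.mem_take_iff_getElem.mpr ⟨i, by omega, rfl⟩
        have hAll : ∀ x ∈ l.take (i+1), x.length = l[i].length :=
          fun x hx => hinv x hx _ hmemi
        have hvmem : l[i+1] ∈ l.drop (i+1) := by
          have h0 : 0 < (l.drop (i+1)).length := by simp; omega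
          have hmem := List.getElem_mem h0
          simpa using hmem
        have hMd : ((l[i+1]'h).length : Int) ≤ pvM (l.drop (i+1)) := le_pvM _ _ hvmem
        have hMt : pvM (l.take (i+1)) ≤ ((l[i]'(by omega)).length : Int) := by
          apply pvM_le _ _ (by have := Int.natCast_nonneg (l[i]'(by omega)).length; omega)
          intro x hx; rw [hAll x hx]
        have hcast : ((l[i]'(by omega)).length : Int) < ((l[i+1]'h).length : Int) := by
          exact_mod_cast hlt
        set t := l.take (i+1) with ht
        set d := l.drop (i+1) with hd
        have hsplit : l = t ++ d := by rw [ht, hd, List.take_append_drop]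
        have hM : pvM l = pvM d := by
          conv_lhs => rw [hsplit]
          rw [pvM_append]; omega
        unfold pvKeep
        rw [← hM]
        set M := pvM l with hMdef
        conv_rhs => rw [hsplit]
        rw [List.filter_append]
        have hnil : t.filter (fun a => ((a.length : Int) == M)) = [] := by
          rw [List.filter_eq_nil_iff]
          intro x hx
          simp only [beq_iff_eq]
          have hx' := hAll x hx
          omega
        rw [hnil, List.nil_append]
      · rw [if_neg hlt]
        by_cases hgt : (l[i]'(by omega)).length > (l[i+1]'h).length
        · rw [if_pos hgt]
          have hm : (l[i+1]'h) ∈ l := List.getElem_mem h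
          have hremove := PySem.List.remove?_eq_some_erase l _ hm
          rw [hremove]
          show retainLoop fuel (l.erase (l[i+1]'h)) i = pvKeep l
          have hlen : (l.erase (l[i+1]'h)).length + 1 = l.length := by
            have := List.length_erase_of_mem hm
            omega
          have hmemi : l[i] ∈ l.take (i+1) :=
            List.mem_take_iff_getElem.mpr ⟨i, by omega, rfl⟩
          have hAll : ∀ z ∈ l.take (i+1), z.length = l[i].length :=
            fun z hz => hinv z hz _ hmemi
          have hMt_ge : ((l[i]'(by omega)).length : Int) ≤ pvM (l.take (i+1)) := le_pvM _ _ hmemi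
          have hcast : ((l[i+1]'h).length : Int) < ((l[i]'(by omega)).length : Int) := by
            exact_mod_cast hgt
          set v := l[i+1]'h with hv
          set t := l.take (i+1) with ht
          set d2 := l.drop (i+2) with hd2
          have hsplit : l = t ++ v :: d2 := by
            rw [ht, hd2, hv]
            conv_lhs => rw [← List.take_append_drop (i+1) l]
            rw [List.drop_eq_getElem_cons h]
          have hvnott : v ∉ t := by
            intro hmem
            have := hAll _ hmem
            omega
          have herase : l.erase v = t ++ d2 := by
            conv_lhs => rw [hsplit]
            rw [List.erase_append_right _ hvnott, List.erase_cons_head]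
          rw [herase] at hlen ⊢
          have htlen : t.length = i + 1 := by rw [ht, List.length_take]; omega
          have htake2 : (t ++ d2).take (i+1) = t := by
            rw [List.take_append_of_le_length (by omega), List.take_of_length_le (by omega)]
          rw [ih _ i (by omega)
            (by intro a ha b hb; rw [htake2] at ha hb; exact hinv a (ht ▸ ha) b (ht ▸ hb))]
          have hM : pvM l = pvM (t ++ d2) := by
            conv_lhs => rw [hsplit]
            rw [pvM_append, pvM_cons, pvM_append]
            omega
          unfold pvKeep
          rw [← hM]
          set M := pvM l with hMdef
          conv_rhs => rw [hsplit]
          have hneg : ¬(((v.length : Int) == M) = true) := by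
            simp only [beq_iff_eq]
            have h1 : ((l[i]'(by omega)).length : Int) ≤ M := by
              rw [hM, pvM_append]; omega
            omega
          rw [List.filter_append, List.filter_append]
          congr 1
          exact (List.filter_cons_of_neg (p := fun a => ((a.length : Int) == M)) (a := v) (l := d2) hneg).symm
        · rw [if_neg hgt]
          apply ih l (i+1) (by omega)
          have hmemi : l[i] ∈ l.take (i+1) :=
            List.mem_take_iff_getElem.mpr ⟨i, by omega, rfl⟩
          have heq : (l[i]'(by omega)).length = (l[i+1]'h).length := by omega
          have htake : l.take (i+2) = l.take (i+1) ++ [l[i+1]'h] := by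
            rw [List.take_succ]
            congr 1
            simp [List.getElem?_eq_getElem h]
          intro x hx y hy
          rw [htake, List.mem_append] at hx hy
          have hx' : x ∈ l.take (i+1) ∨ x = l[i+1]'h := by simpa using hx
          have hy' : y ∈ l.take (i+1) ∨ y = l[i+1]'h := by simpa using hy
          rcases hx' with hx' | hx' <;> rcases hy' with hy' | hy'
          · exact hinv x hx' y hy'
          · subst hy'; rw [hinv x hx' _ hmemi, heq]
          · subst hx'; rw [← heq]; exact (hinv y hy' _ hmemi).symm
          · subst hx'; subst hy'; rfl
    · rw [dif_neg h]
      exact pvTerminal l i (by omega) hinv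

-- B's foldl computes (max length, the filtered list)
theorem foldB (l : List (List Int)) :
    l.foldl (fun s a =>
      let n : Int := a.length
      if n > s.1 then (n, [a])
      else if n = s.1 then (s.1, s.2 ++ [a])
      else s) ((-1 : Int), ([] : List (List Int)))
    = (pvM l, pvKeep l) := by
  induction l using List.reverseRecOn with
  | nil => simp [pvM, pvKeep]
  | append_singleton p a ih =>
    rw [List.foldl_append, ih]
    simp only [List.foldl_cons, List.foldl_nil]
    have hMa : pvM (p ++ [a]) = max (pvM p) (a.length : Int) := by
      rw [pvM_append, pvM_cons]
      have := Int.natCast_nonneg a.length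
      have : pvM [] = -1 := rfl
      simp only [pvM] at *
      omega
    have ha : (0:Int) ≤ (a.length : Int) := Int.natCast_nonneg _
    by_cases h1 : ((a.length : Int)) > pvM p
    · rw [if_pos h1]
      have hM : pvM (p ++ [a]) = (a.length : Int) := by omega
      unfold pvKeep
      rw [hM]
      have hnil : p.filter (fun x => ((x.length : Int) == (a.length : Int))) = [] := by
        rw [List.filter_eq_nil_iff]
        intro x hx
        simp only [beq_iff_eq]
        have := le_pvM x p hx
        omega
      rw [List.filter_append, hnil, List.nil_append]
      simp
    · rw [if_neg h1]
      by_cases h2 : ((a.length : Int)) = pvM p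
      · rw [if_pos h2]
        have hM : pvM (p ++ [a]) = pvM p := by omega
        unfold pvKeep
        rw [hM, List.filter_append]
        simp [h2]
      · rw [if_neg h2]
        have hM : pvM (p ++ [a]) = pvM p := by omega
        unfold pvKeep
        rw [hM, List.filter_append]
        have : ((a.length : Int) == pvM p) = false := by
          simp only [beq_eq_false_iff_ne]; exact h2
        simp [this]

-- ===== VERDICT (by name: the statement is the Claim_ definition above) =====
theorem retain_largest_spec : Claim_equal_retain_largest := by
  intro allies _
  unfold Spec_retain_largest retain_largest retain_largest_alt
  rw [foldB, retainLoop_eq allies.length allies 0 (by omega) (pvInv_zero allies)]
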